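-- pv_equiv track=rewrite | github.com/Komodo64/Archivos-de-Python | 1-10-25/5.py | recomendar_intereses
-- ===== SOURCE A (Python) =====
-- def usuarios_similares(grafo, usuario):
--     # Si el usuario no existe, retornamos diccionario vacío
--     if usuario not in grafo:
--         return {}
--
--     intereses_usuario = grafo[usuario]  # Intereses del usuario objetivo
--     similitudes = {}  # Diccionario para almacenar similitudes
--
--     # Comparamos con cada otro usuario
--     for otro_usuario, intereses_otro in grafo.items():
--         # No comparamos al usuario consigo mismo
--         if otro_usuario != usuario:
--             # Calculamos intersección de intereses (intereses comunes)
--             comunes = intereses_usuario.intersection(intereses_otro)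
--             # Si hay intereses comunes, guardamos la cantidad
--             if comunes:
--                 similitudes[otro_usuario] = len(comunes)
--
--     # Retornamos diccionario ordenado por similitud (mayor a menor)
--     return dict(sorted(similitudes.items(), key=lambda x: x[1], reverse=True))
--
-- def recomendar_intereses(grafo, usuario):
--     # Obtenemos usuarios similares
--     similares = usuarios_similares(grafo, usuario)
--
--     # Si no hay usuarios similares, no hay recomendaciones
--     if not similares:
--         return set()
--
--     intereses_actuales = grafo[usuario]  # Intereses que ya tiene el usuario
--     recomendaciones = set()  # Conjunto para almacenar recomendaciones
--
--     # Recorremos usuarios similares (ya están ordenados por similitud)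
--     for usuario_similar in similares.keys():
--         # Obtenemos intereses del usuario similar que no tiene el usuario actual
--         nuevos = grafo[usuario_similar].difference(intereses_actuales)
--         # Agregamos estos intereses a las recomendaciones
--         recomendaciones.update(nuevos)
--
--     return recomendaciones
-- ===== SOURCE B (Python) =====
-- def recomendar_intereses(grafo, usuario):
--     # Counting sort replaces the comparison sort: bucket every other user's
--     # interest set by how many interests it shares with the target, then sweep
--     # the bucket table from the highest possible count down to 1.
--     if usuario not in grafo:
--         return set()
--     intereses = grafo[usuario]
--     buckets = {}
--     for otro, otros_intereses in grafo.items():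
--         if otro == usuario:
--             continue
--         c = len(intereses & otros_intereses)
--         if c != 0:
--             buckets[c] = buckets.get(c, []) + [otros_intereses]
--     recomendaciones = set()
--     for c in range(len(intereses), 0, -1):
--         for conjunto in buckets.get(c, []):
--             recomendaciones.update(conjunto - intereses)
--     return recomendaciones
-- ===== Notes on version B (the rewrite author's own statement) =====
-- stated objective: alternative
-- what changed: A builds a similarity dict, comparison-sorts it by count (stable, descending) and then loops over the sorted users looking each one up again; B never sorts or re-looks-up: it buckets the other users' interest sets by shared-interest count in one pass and sweeps the bucket table from the maximum possible count down to 1 (a counting sort).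
import Mathlib
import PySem

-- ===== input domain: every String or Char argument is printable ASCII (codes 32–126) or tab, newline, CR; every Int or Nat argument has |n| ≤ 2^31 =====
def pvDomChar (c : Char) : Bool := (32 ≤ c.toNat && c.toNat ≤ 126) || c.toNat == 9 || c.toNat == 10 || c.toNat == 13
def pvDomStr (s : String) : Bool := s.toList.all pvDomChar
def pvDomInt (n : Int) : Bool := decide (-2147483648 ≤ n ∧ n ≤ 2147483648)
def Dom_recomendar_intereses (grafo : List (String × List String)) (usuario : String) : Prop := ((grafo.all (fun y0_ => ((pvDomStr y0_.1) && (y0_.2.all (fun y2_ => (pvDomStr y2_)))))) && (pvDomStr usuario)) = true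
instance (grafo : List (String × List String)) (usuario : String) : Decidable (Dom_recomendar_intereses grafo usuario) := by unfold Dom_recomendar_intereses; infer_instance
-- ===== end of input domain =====

-- B replaces A's build-similarity-dict / comparison-sort / second-lookup-loop pipeline by a
-- single bucketing pass (a counting sort on the shared-interest count) swept from the highest
-- count down; alternative algorithm, same result.


-- ===== PORT A =====
def usuarios_similares (grafo : List (String × List String)) (usuario : String) :
    PySem.Dict String Int :=
  if !(PySem.Dict.mk grafo).contains usuario then PySem.Dict.empty
  else
    let intereses_usuario := (PySem.Dict.mk grafo).getD usuario []
    let similitudes := grafo.foldl (fun sim p =>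
      if p.1 ≠ usuario then
        let comunes := PySem.Set.inter intereses_usuario p.2
        if comunes ≠ [] then sim.insert p.1 ((comunes.length : Int)) else sim
      else sim) PySem.Dict.empty
    PySem.Dict.ofList (PySem.List.sorted similitudes.items (fun x => x.2) true)

def recomendar_intereses (grafo : List (String × List String)) (usuario : String) : List String :=
  let similares := usuarios_similares grafo usuario
  if similares.size = 0 then PySem.Set.empty
  else
    let intereses_actuales := (PySem.Dict.mk grafo).getD usuario []
    similares.keys.foldl (fun recomendaciones u =>
      let nuevos := PySem.Set.diff ((PySem.Dict.mk grafo).getD u []) intereses_actuales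
      PySem.Set.update recomendaciones nuevos) PySem.Set.empty

-- ===== PORT B =====
def recomendar_intereses_alt (grafo : List (String × List String)) (usuario : String) : List String :=
  if !(PySem.Dict.mk grafo).contains usuario then PySem.Set.empty
  else
    let intereses := (PySem.Dict.mk grafo).getD usuario []
    let buckets : PySem.Dict Int (List (List String)) := grafo.foldl (fun b p =>
      if p.1 = usuario then b
      else
        let c := (PySem.Set.inter intereses p.2).length
        if c ≠ 0 then b.insert (c : Int) (b.getD (c : Int) [] ++ [p.2]) else b) PySem.Dict.empty
    (PySem.List.pyRange ((intereses.length : Int)) 0 (-1)).foldl (fun recomendaciones c =>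
      (buckets.getD c []).foldl (fun recomendaciones conjunto =>
        PySem.Set.update recomendaciones (PySem.Set.diff conjunto intereses)) recomendaciones)
      PySem.Set.empty

-- ===== PRECONDITION & SPEC =====
-- Pre_ restricts to faithful encodings of A's dict[str, set[str]] argument: distinct keys and
-- duplicate-free value lists, since a Python dict cannot hold a key twice nor a set an element twice.
def Pre_recomendar_intereses (grafo : List (String × List String)) (usuario : String) : Prop :=
  (grafo.map Prod.fst).Nodup ∧ ∀ p ∈ grafo, p.2.Nodup
instance (grafo : List (String × List String)) (usuario : String) : Decidable (Pre_recomendar_intereses grafo usuario) := by unfold Pre_recomendar_intereses; infer_instance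
def pvWitness_recomendar_intereses : (List (String × List String)) × String :=
  ([("ana", ["a", "b"]), ("bob", ["b", "c"]), ("eva", ["c"])], "ana")

def Spec_recomendar_intereses (grafo : List (String × List String)) (usuario : String) (out : List String) : Prop := out = recomendar_intereses_alt grafo usuario
instance (grafo : List (String × List String)) (usuario : String) (out : List String) : Decidable (Spec_recomendar_intereses grafo usuario out) := by unfold Spec_recomendar_intereses; infer_instance

-- ===== CLAIM (what is proved, stated in full; the proofs are below) =====
def Claim_equal_recomendar_intereses : Prop := ∀ (grafo : List (String × List String)) (usuario : String), Dom_recomendar_intereses grafo usuario → Pre_recomendar_intereses grafo usuario → Spec_recomendar_intereses grafo usuario (recomendar_intereses grafo usuario)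

-- ===== LEMMAS AND PROOFS =====

-- The other users that share at least one interest with `ints` (in grafo order).
def pvRel (ints : List String) (usuario : String) (grafo : List (String × List String)) :
    List (String × List String) :=
  grafo.filter (fun p => decide (p.1 ≠ usuario ∧ PySem.Set.inter ints p.2 ≠ []))

-- The similarity count of an entry, as an Int (the sort key).
def pvKey (ints : List String) (p : String × List String) : Int :=
  ((PySem.Set.inter ints p.2).length : Int)

-- One recommendation step.
def pvUpd (ints : List String) (recs : List String) (p : String × List String) : List String :=
  PySem.Set.update recs (PySem.Set.diff p.2 ints)

-- The common normal form both ports are reduced to.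
def pvCanon (grafo : List (String × List String)) (usuario : String) (ints : List String) :
    List String :=
  (PySem.List.pyRange ((ints.length : Int)) 0 (-1)).foldl (fun recs c =>
    ((pvRel ints usuario grafo).filter (fun p => decide (pvKey ints p = c))).foldl
      (pvUpd ints) recs) []

theorem pv_countdown (m : Nat) :
    PySem.List.pyRange ((m : Int)) 0 (-1) =
      (List.range m).map (fun k : Nat => ((m : Int) - (k : Int))) := by
  unfold PySem.List.pyRange
  cases m with
  | zero => simp
  | succ n =>
    have h1 : (0:Int) < (n+1:Nat) := by positivity
    simp only [if_neg (by norm_num : ¬((-1:Int) = 0)), if_neg (by norm_num : ¬(0:Int) < -1),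
      if_pos h1]
    have hcnt : ((((n+1:Nat):Int) - 0 + -(-1) - 1) / -(-1)).toNat = n + 1 := by norm_num
    rw [hcnt]
    apply List.map_congr_left
    intro k _
    push_cast
    ring

theorem pv_countdown_succ (m : Nat) :
    PySem.List.pyRange (((m + 1 : Nat) : Int)) 0 (-1) =
      ((m + 1 : Nat) : Int) :: PySem.List.pyRange ((m : Int)) 0 (-1) := by
  rw [pv_countdown, pv_countdown, List.range_succ_eq_map]
  simp only [List.map_cons, List.map_map, Nat.cast_zero, Nat.cast_add, Nat.cast_one, sub_zero]
  congr 1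
  apply List.map_congr_left
  intro k _
  simp only [Function.comp]
  push_cast
  ring

theorem pv_mem_countdown {m : Nat} {c : Int} (h : c ∈ PySem.List.pyRange ((m : Int)) 0 (-1)) :
    1 ≤ c ∧ c ≤ (m : Int) := by
  rw [pv_countdown] at h
  simp only [List.mem_map] at h
  obtain ⟨k, hk, rfl⟩ := h
  have := List.mem_range.mp hk
  omega
theorem pv_split {α : Type} (key : α → Int) (n : Int) :
    ∀ (l : List α), l.Pairwise (fun a b => key b ≤ key a) → (∀ p ∈ l, key p ≤ n) →
      l.filter (fun p => decide (key p = n)) ++ l.filter (fun p => decide (key p ≤ n - 1)) = l := by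
  intro l
  induction l with
  | nil => simp
  | cons a t ih =>
    intro hp hb
    rw [List.pairwise_cons] at hp
    by_cases ha : key a = n
    · have ht1 : t.filter (fun p => decide (key p ≤ n - 1)) = t.filter (fun p => decide (key p ≤ n - 1)) := rfl
      simp only [List.filter_cons, decide_eq_true_eq, if_pos ha, if_neg (by omega : ¬ (key a ≤ n - 1)), List.cons_append]
      rw [ih hp.2 (fun p hp' => hb p (List.mem_cons_of_mem _ hp'))]
    · have ha' : key a ≤ n - 1 := by have := hb a (List.mem_cons_self); omega
      have ht : t.filter (fun p => decide (key p = n)) = [] := by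
        rw [List.filter_eq_nil_iff]
        intro x hx
        have := hp.1 x hx
        simp only [decide_eq_true_eq]
        omega
      have ht2 : t.filter (fun p => decide (key p ≤ n - 1)) = t := by
        rw [List.filter_eq_self]
        intro x hx
        have := hp.1 x hx
        simp only [decide_eq_true_eq]
        omega
      simp only [List.filter_cons, decide_eq_true_eq, if_neg ha, if_pos ha', ht, ht2, List.nil_append]

theorem pv_decomp {α : Type} (key : α → Int) :
    ∀ (m : Nat) (l : List α), l.Pairwise (fun a b => key b ≤ key a) →
      (∀ p ∈ l, 1 ≤ key p ∧ key p ≤ (m : Int)) →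
      l = (PySem.List.pyRange ((m : Int)) 0 (-1)).flatMap
            (fun c => l.filter (fun p => decide (key p = c))) := by
  intro m
  induction m with
  | zero =>
    intro l _ hb
    cases l with
    | nil => simp [PySem.List.pyRange]
    | cons a t => exact absurd (hb a List.mem_cons_self) (by omega)
  | succ m ih =>
    intro l hp hb
    rw [pv_countdown_succ, List.flatMap_cons]
    have hsplit := pv_split key ((m+1 : Nat) : Int) l hp (fun p hp' => by
      have := (hb p hp').2; push_cast at this ⊢; omega)
    set l2 := l.filter (fun p => decide (key p ≤ ((m+1:Nat):Int) - 1)) with hl2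
    have hl2' : l2 = l.filter (fun p => decide (key p ≤ (m : Int))) := by
      rw [hl2]; apply List.filter_congr; intro x _
      simp only [decide_eq_decide]
      push_cast
      omega
    have h2 := ih l2 (hp.filter _) (fun p hp' => by
      rw [hl2'] at hp'
      have hm := List.of_mem_filter hp'
      have hl := hb p (List.mem_of_mem_filter hp')
      simp only [decide_eq_true_eq] at hm
      exact ⟨hl.1, hm⟩)
    nth_rewrite 1 [← hsplit]
    congr 1
    rw [h2]
    apply List.flatMap_congr
    intro c hc
    have hbnd := pv_mem_countdown hc
    rw [hl2', List.filter_filter]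
    apply List.filter_congr
    intro x _
    simp only [Bool.and_eq_left_iff_imp, decide_eq_true_eq]
    intro h; omega


theorem pv_insertBy_filter {α : Type} (key : α → Int) (c : Int) (x : α) :
    ∀ (ys : List α), ys.Pairwise (fun a b => key b ≤ key a) →
      (PySem.List.insertBy (fun a b => decide (key b < key a)) x ys).filter
          (fun p => decide (key p = c)) =
        ys.filter (fun p => decide (key p = c)) ++ (if key x = c then [x] else []) := by
  intro ys
  induction ys with
  | nil =>
    intro _
    simp [PySem.List.insertBy, List.filter_cons]
  | cons y t ih =>
    intro hp
    rw [List.pairwise_cons] at hp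
    by_cases hb : key y < key x
    · rw [show PySem.List.insertBy (fun a b => decide (key b < key a)) x (y :: t) =
          x :: y :: t from by simp [PySem.List.insertBy, hb]]
      by_cases hxc : key x = c
      · have hyt : (y :: t).filter (fun p => decide (key p = c)) = [] := by
          rw [List.filter_eq_nil_iff]
          intro p hpmem
          simp only [decide_eq_true_eq]
          rcases List.mem_cons.mp hpmem with rfl | hmem
          · omega
          · have := hp.1 p hmem; omega
        simp [hxc, hyt]
      · simp [hxc]
    · rw [show PySem.List.insertBy (fun a b => decide (key b < key a)) x (y :: t) =
          y :: PySem.List.insertBy (fun a b => decide (key b < key a)) x t from by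
            simp [PySem.List.insertBy, hb]]
      rw [List.filter_cons, List.filter_cons, ih hp.2]
      split <;> rename_i h <;> first | simp [h] | simp

theorem pv_foldl_insertBy_filter {α : Type} (key : α → Int) (c : Int) :
    ∀ (xs : List α) (acc : List α), acc.Pairwise (fun a b => key b ≤ key a) →
      ((xs.foldl (fun acc x => PySem.List.insertBy (fun a b => decide (key b < key a)) x acc) acc).filter
          (fun p => decide (key p = c))) =
        acc.filter (fun p => decide (key p = c)) ++ xs.filter (fun p => decide (key p = c)) := by
  intro xs
  induction xs with
  | nil => intro acc _; simp
  | cons x t ih =>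
    intro acc hp
    rw [List.foldl_cons, ih _ (PySem.List.insertBy_pairwise_ge key x acc hp),
      pv_insertBy_filter key c x acc hp, List.filter_cons]
    split <;> rename_i h <;> simp [h]

theorem pv_sorted_stable {α : Type} (key : α → Int) (c : Int) (xs : List α) :
    (PySem.List.sorted xs key true).filter (fun p => decide (key p = c)) =
      xs.filter (fun p => decide (key p = c)) := by
  rw [PySem.List.sorted_rev_eq_foldl_insertBy, pv_foldl_insertBy_filter key c xs [] (by simp)]
  simp

theorem pv_insertBy_map {α β : Type} (f : α → β) (k2 : β → Int) (x : α) :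
    ∀ (ys : List α),
      PySem.List.insertBy (fun a b => decide (k2 b < k2 a)) (f x) (ys.map f) =
        (PySem.List.insertBy (fun a b => decide (k2 (f b) < k2 (f a))) x ys).map f := by
  intro ys
  induction ys with
  | nil => simp [PySem.List.insertBy]
  | cons y t ih =>
    simp only [List.map_cons, PySem.List.insertBy]
    split <;> simp_all

theorem pv_sorted_map {α β : Type} (f : α → β) (k2 : β → Int) (xs : List α) :
    PySem.List.sorted (xs.map f) k2 true =
      (PySem.List.sorted xs (fun x => k2 (f x)) true).map f := by
  rw [PySem.List.sorted_rev_eq_foldl_insertBy, PySem.List.sorted_rev_eq_foldl_insertBy]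
  suffices h : ∀ (xs : List α) (acc : List α),
      (xs.map f).foldl (fun acc x => PySem.List.insertBy (fun a b => decide (k2 b < k2 a)) x acc) (acc.map f) =
        (xs.foldl (fun acc x => PySem.List.insertBy (fun a b => decide (k2 (f b) < k2 (f a))) x acc) acc).map f by
    exact h xs []
  intro xs
  induction xs with
  | nil => simp
  | cons x t ih =>
    intro acc
    rw [List.map_cons, List.foldl_cons, List.foldl_cons, pv_insertBy_map f k2 x acc, ih]


theorem pv_A_eq_canon (grafo : List (String × List String)) (usuario : String)
    (hk : (grafo.map Prod.fst).Nodup)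
    (hc : (PySem.Dict.mk grafo).contains usuario = true) :
    recomendar_intereses grafo usuario =
      pvCanon grafo usuario ((PySem.Dict.mk grafo).getD usuario []) := by
  unfold recomendar_intereses usuarios_similares
  simp only [hc, Bool.not_true, Bool.false_eq_true, if_false]
  set ints := (PySem.Dict.mk grafo).getD usuario [] with hints
  -- 1. the similarity loop inserts one fresh key per relevant entry
  have hbody : grafo.foldl (fun sim p =>
        if p.1 ≠ usuario then
          let comunes := PySem.Set.inter ints p.2
          if comunes ≠ [] then sim.insert p.1 ((comunes.length : Int)) else sim
        else sim) (PySem.Dict.empty : PySem.Dict String Int) =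
      (pvRel ints usuario grafo).foldl
        (fun sim p => sim.insert p.1 (pvKey ints p)) PySem.Dict.empty := by
    rw [PySem.List.foldl_congr_mem _ _
      (fun sim p => if p.1 ≠ usuario ∧ PySem.Set.inter ints p.2 ≠ [] then
        sim.insert p.1 (pvKey ints p) else sim) _ ?_]
    · exact PySem.List.foldl_ite_eq_foldl_filter _ _ _ _
    · intro sim p _
      by_cases h1 : p.1 = usuario
      · simp [h1]
      · by_cases h2 : PySem.Set.inter ints p.2 = []
        · simp [h1, h2]
        · simp only [h1, h2, ne_eq, not_false_iff, and_self, if_true]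
          rfl
  rw [hbody]
  have hrelsub : (pvRel ints usuario grafo).Sublist grafo := by
    unfold pvRel; exact List.filter_sublist
  have hrelkeys : ((pvRel ints usuario grafo).map Prod.fst).Nodup :=
    (hrelsub.map Prod.fst).nodup hk
  -- 2. so the similarity dict's items are the relevant entries with their counts
  have hitems : ((pvRel ints usuario grafo).foldl
        (fun sim p => sim.insert p.1 (pvKey ints p)) PySem.Dict.empty).items =
      (pvRel ints usuario grafo).map (fun p => (p.1, pvKey ints p)) := by
    rw [PySem.Dict.items_foldl_insert_fresh _ Prod.fst (fun p => pvKey ints p) _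
      (fun a _ => PySem.Dict.contains_empty _) hrelkeys]
    rfl
  rw [hitems]
  -- 3. sorting the mapped items is mapping the sorted relevant entries
  have hsorted : PySem.List.sorted
        ((pvRel ints usuario grafo).map (fun p => (p.1, pvKey ints p))) (fun x => x.2) true =
      (PySem.List.sorted (pvRel ints usuario grafo) (fun p => pvKey ints p) true).map
        (fun p => (p.1, pvKey ints p)) :=
    pv_sorted_map _ _ _
  rw [hsorted]
  set srel := PySem.List.sorted (pvRel ints usuario grafo) (fun p => pvKey ints p) true
    with hsrel
  -- 4. the reinserted dict keeps exactly those items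
  have hskeys : ((srel.map (fun p => (p.1, pvKey ints p))).map Prod.fst).Nodup := by
    rw [List.map_map, show (Prod.fst ∘ fun (p : String × List String) => (p.1, pvKey ints p)) =
      (Prod.fst : String × List String → String) from rfl]
    exact ((PySem.List.sorted_perm (pvRel ints usuario grafo) (fun p => pvKey ints p) true).map
      Prod.fst).nodup_iff.mpr hrelkeys
  have hofitems : (PySem.Dict.ofList (srel.map (fun p => (p.1, pvKey ints p)))).items =
      srel.map (fun p => (p.1, pvKey ints p)) := by
    unfold PySem.Dict.ofList PySem.Dict.update
    rw [PySem.Dict.items_foldl_insert_fresh _ Prod.fst Prod.snd _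
      (fun a _ => PySem.Dict.contains_empty _) hskeys]
    simp [PySem.Dict.empty]
  by_cases hnil : pvRel ints usuario grafo = []
  · -- no similar user: A returns the empty set, and the sweep over empty classes is empty too
    simp only [PySem.Dict.size, hofitems, hsrel, hnil]
    simp [PySem.List.sorted, pvCanon, PySem.Set.empty, PySem.List.foldl_ignore,
      PySem.Dict.ofList, PySem.Dict.update, PySem.Dict.empty, PySem.Dict.keys, hnil]
  · have hlen : (srel.map (fun p => (p.1, pvKey ints p))).length ≠ 0 := by
      simp only [List.length_map, hsrel, PySem.List.length_sorted]
      exact fun h => hnil (List.length_eq_zero_iff.mp h)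
    simp only [PySem.Dict.size, hofitems, if_neg hlen, PySem.Dict.keys, List.map_map]
    -- 5. each similar user's lookup is its own interest set
    rw [show (List.map ((fun x => x.1) ∘ fun p => (p.1, pvKey ints p)) srel) =
        List.map (fun p => p.1) srel from rfl, List.foldl_map,
      PySem.List.foldl_congr_mem srel _ (pvUpd ints) _ (fun recs p hp => by
        have hmem : p ∈ grafo :=
          hrelsub.mem ((PySem.List.mem_sorted _ _ _ _).mp hp)
        have : (PySem.Dict.mk grafo).getD p.1 [] = p.2 :=
          PySem.Dict.getD_of_mem_items (PySem.Dict.mk grafo) hmem hk []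
        simp only [this]
        rfl)]
    -- 6. the sorted list splits into key classes, swept from the top count down
    have hdec := pv_decomp (pvKey ints) ints.length srel
      (PySem.List.sorted_pairwise_rev _ _)
      (fun p hp => by
        have hrel := (PySem.List.mem_sorted _ _ _ _).mp hp
        have h2 := List.of_mem_filter hrel
        simp only [decide_eq_true_eq] at h2
        constructor
        · have : (PySem.Set.inter ints p.2).length ≠ 0 :=
            fun h => h2.2 (List.length_eq_zero_iff.mp h)
          unfold pvKey; omega
        · unfold pvKey
          have := List.length_filter_le (fun x => (p.2 : PySem.Set String).contains x) ints
          exact_mod_cast this)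
    rw [hdec, List.foldl_flatMap]
    unfold pvCanon
    apply PySem.List.foldl_congr_mem
    intro recs c _
    rw [pv_sorted_stable]

theorem pv_B_eq_canon (grafo : List (String × List String)) (usuario : String)
    (hc : (PySem.Dict.mk grafo).contains usuario = true) :
    recomendar_intereses_alt grafo usuario =
      pvCanon grafo usuario ((PySem.Dict.mk grafo).getD usuario []) := by
  unfold recomendar_intereses_alt pvCanon
  simp only [hc, Bool.not_true, Bool.false_eq_true, if_false]
  set ints := (PySem.Dict.mk grafo).getD usuario [] with hints
  -- 1. the bucket-building loop is a guarded modify-loop over the relevant entries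
  have hbody : grafo.foldl (fun b p =>
        if p.1 = usuario then b
        else
          let c := (PySem.Set.inter ints p.2).length
          if c ≠ 0 then b.insert ((c : Int)) (b.getD ((c : Int)) [] ++ [p.2]) else b)
        (PySem.Dict.empty : PySem.Dict Int (List (List String))) =
      (pvRel ints usuario grafo).foldl
        (fun b p => b.modify (pvKey ints p) [] (· ++ [p.2])) PySem.Dict.empty := by
    rw [PySem.List.foldl_congr_mem _ _
      (fun b p => if p.1 ≠ usuario ∧ PySem.Set.inter ints p.2 ≠ [] then
        b.modify (pvKey ints p) [] (· ++ [p.2]) else b) _ ?_]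
    · exact PySem.List.foldl_ite_eq_foldl_filter _ _ _ _
    · intro b p _
      by_cases h1 : p.1 = usuario
      · simp [h1]
      · by_cases h2 : PySem.Set.inter ints p.2 = []
        · simp [h1, h2, List.length_eq_zero_iff.mpr h2]
        · have hlen : (PySem.Set.inter ints p.2).length ≠ 0 :=
            fun h => h2 (List.length_eq_zero_iff.mp h)
          simp only [h1, h2, hlen, ne_eq, not_false_iff, and_self, if_true, if_false]
          rfl
  rw [hbody]
  -- 2. its lookups are the key classes of the relevant entries
  have hgetD : ∀ c : Int,
      ((pvRel ints usuario grafo).foldl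
        (fun b p => b.modify (pvKey ints p) [] (· ++ [p.2])) PySem.Dict.empty).getD c [] =
      ((pvRel ints usuario grafo).filter (fun p => decide (pvKey ints p = c))).map (·.2) := by
    intro c
    rw [← List.foldl_map (f := fun p => (pvKey ints p, p.2))
      (g := fun (b : PySem.Dict Int (List (List String))) q => b.modify q.1 [] (· ++ [q.2])),
      PySem.Dict.getD_foldl_modify_append, List.filter_map]
    simp only [PySem.Dict.getD_empty, List.nil_append, List.map_map]
    rfl
  -- 3. the sweep folds each key class
  apply PySem.List.foldl_congr_mem
  intro recs c hc'
  rw [hgetD c, List.foldl_map]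
  rfl

-- ===== VERDICT (by name: the statement is the Claim_ definition above) =====
theorem recomendar_intereses_spec : Claim_equal_recomendar_intereses := by
  intro grafo usuario _ hpre
  unfold Spec_recomendar_intereses
  by_cases hc : (PySem.Dict.mk grafo).contains usuario = true
  · rw [pv_A_eq_canon grafo usuario hpre.1 hc, pv_B_eq_canon grafo usuario hc]
  · simp only [Bool.not_eq_true] at hc
    simp [recomendar_intereses, recomendar_intereses_alt, usuarios_similares, hc,
      PySem.Dict.empty, PySem.Dict.size, PySem.Set.empty]
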